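-- pv_equiv track=rewrite | github.com/isabella232/k | pyk/src/pyk/utils.py | find_common_items
-- ===== SOURCE A (Python) =====
-- from typing import (
--     Any,
--     Dict,
--     Iterable,
--     Iterator,
--     List,
--     Mapping,
--     Optional,
--     Tuple,
--     TypeVar,
-- )
--
-- T = TypeVar('T')
--
-- def find_common_items(l1: Iterable[T], l2: Iterable[T]) -> Tuple[List[T], List[T], List[T]]:
--     common = []
--     for i in l1:
--         if i in l2:
--             common.append(i)
--     newL1 = []
--     newL2 = []
--     for i in l1:
--         if i not in common:
--             newL1.append(i)
--     for i in l2: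
--         if i not in common:
--             newL2.append(i)
--     return (common, newL1, newL2)
-- ===== SOURCE B (Python) =====
-- def find_common_items(l1, l2):
--     l1, l2 = list(l1), list(l2)
--     s1, s2 = set(l1), set(l2)
--     common = []
--     newL1 = []
--     for x in l1:
--         (common if x in s2 else newL1).append(x)
--     newL2 = [x for x in l2 if x not in s1]
--     return (common, newL1, newL2)
-- ===== Notes on version B (the rewrite author's own statement) =====
-- stated objective: faster
-- what changed: Replaces A's three passes with quadratic list-membership tests (i in l2, i not in common) by one fused pass over l1 routing each element into common or newL1 via a precomputed set, plus one pass over l2 against set(l1), giving expected O(n+m) instead of O(n*m).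
import Mathlib
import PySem

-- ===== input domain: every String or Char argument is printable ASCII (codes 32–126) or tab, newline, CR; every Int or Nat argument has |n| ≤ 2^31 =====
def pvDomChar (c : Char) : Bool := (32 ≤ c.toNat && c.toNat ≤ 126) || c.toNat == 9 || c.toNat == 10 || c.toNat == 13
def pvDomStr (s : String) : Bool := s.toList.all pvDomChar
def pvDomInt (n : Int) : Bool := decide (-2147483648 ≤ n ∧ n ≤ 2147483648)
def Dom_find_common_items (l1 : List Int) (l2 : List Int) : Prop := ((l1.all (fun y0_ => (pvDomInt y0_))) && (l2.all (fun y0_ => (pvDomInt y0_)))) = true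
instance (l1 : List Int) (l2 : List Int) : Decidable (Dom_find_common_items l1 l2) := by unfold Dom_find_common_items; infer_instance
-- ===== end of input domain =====

-- B fuses A's two quadratic l1 passes into one set-routed pass (objective: faster, O(n+m) expected).

-- ===== PORT A =====
def find_common_items (l1 : List Int) (l2 : List Int) : List Int × List Int × List Int :=
  let common := l1.foldl (fun acc i => if l2.contains i then acc ++ [i] else acc) []
  let newL1 := l1.foldl (fun acc i => if common.contains i then acc else acc ++ [i]) []
  let newL2 := l2.foldl (fun acc i => if common.contains i then acc else acc ++ [i]) []
  (common, newL1, newL2)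

-- ===== PORT B =====
def find_common_items_alt (l1 : List Int) (l2 : List Int) : List Int × List Int × List Int :=
  let s1 := PySem.Set.ofList l1
  let s2 := PySem.Set.ofList l2
  let p := l1.foldl
    (fun (p : List Int × List Int) x =>
      if PySem.Set.contains s2 x then (p.1 ++ [x], p.2) else (p.1, p.2 ++ [x]))
    ([], [])
  let newL2 := l2.filter (fun x => !PySem.Set.contains s1 x)
  (p.1, p.2, newL2)

-- ===== PRECONDITION & SPEC =====
def Spec_find_common_items (l1 : List Int) (l2 : List Int) (out : List Int × List Int × List Int) : Prop := out = find_common_items_alt l1 l2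
instance (l1 : List Int) (l2 : List Int) (out : List Int × List Int × List Int) : Decidable (Spec_find_common_items l1 l2 out) := by unfold Spec_find_common_items; infer_instance

-- ===== CLAIM (what is proved, stated in full; the proofs are below) =====
def Claim_equal_find_common_items : Prop := ∀ (l1 : List Int) (l2 : List Int), Dom_find_common_items l1 l2 → Spec_find_common_items l1 l2 (find_common_items l1 l2)

-- ===== LEMMAS AND PROOFS =====

-- A's "append unless in common" loop is a filter
theorem foldl_skip_if (p : Int → Bool) (l init : List Int) :
    l.foldl (fun acc i => if p i then acc else acc ++ [i]) init
      = init ++ l.filter (fun i => !p i) := by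
  induction l generalizing init with
  | nil => simp
  | cons x xs ih =>
    by_cases h : p x <;> simp [h, ih, List.append_assoc]

-- A's "append if" loop is a filter
theorem foldl_keep_if (p : Int → Bool) (l init : List Int) :
    l.foldl (fun acc i => if p i then acc ++ [i] else acc) init
      = init ++ l.filter p := by
  induction l generalizing init with
  | nil => simp
  | cons x xs ih =>
    by_cases h : p x <;> simp [h, ih, List.append_assoc]

-- B's fused pair loop is two filters
theorem foldl_route (p : Int → Bool) (l : List Int) (a b : List Int) :
    l.foldl (fun (s : List Int × List Int) x =>
        if p x then (s.1 ++ [x], s.2) else (s.1, s.2 ++ [x])) (a, b)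
      = (a ++ l.filter p, b ++ l.filter (fun x => !p x)) := by
  induction l generalizing a b with
  | nil => simp
  | cons x xs ih =>
    by_cases h : p x <;> simp [h, ih, List.append_assoc]

-- ===== VERDICT (by name: the statement is the Claim_ definition above) =====
theorem find_common_items_spec : Claim_equal_find_common_items := by
  intro l1 l2 _
  unfold Spec_find_common_items find_common_items find_common_items_alt
  simp only [foldl_keep_if, foldl_skip_if, foldl_route, List.nil_append]
  refine Prod.ext ?_ (Prod.ext ?_ ?_)
  · -- common
    apply List.filter_congr
    intro x _
    by_cases h2 : x ∈ l2 <;> simp [PySem.Set.mem_ofList, h2]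
  · -- newL1
    apply List.filter_congr
    intro x hx
    by_cases h2 : x ∈ l2 <;>
      simp [List.mem_filter, PySem.Set.mem_ofList, hx, h2]
  · -- newL2
    apply List.filter_congr
    intro x hx
    by_cases h1 : x ∈ l1 <;>
      simp [List.mem_filter, PySem.Set.mem_ofList, hx, h1]
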